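-- pv_equiv track=rewrite | github.com/prashanthr11/Leetcode_solutions | 1996-the-number-of-weak-characters-in-the-game/1996-the-number-of-weak-characters-in-the-game.py | naive
-- ===== SOURCE A (Python) =====
-- def naive(properties):
--     '''
--     Time Complexity: O(N^2)
--     Space Complexity: O(1)
--     '''
--     ln = len(properties)
--     cnt = 0
--
--     for i in range(ln):
--         flag = False
--         for j in range(ln):
--             if properties[i][0] < properties[j][0] and properties[i][1] < properties[j][1]:
--                 flag = True
--                 break
--
--         if flag:
--             cnt += 1
--
--     return cnt
-- ===== SOURCE B (Python) =====
-- def naive(properties):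
--     # Sort by attack descending, defense ascending; then one sweep:
--     # a character is weak iff its defense is strictly below the max defense
--     # seen so far (which then necessarily belongs to a strictly higher attack).
--     cnt = 0
--     maxd = None
--     for p in sorted(properties, key=lambda q: (-q[0], q[1])):
--         d = p[1]
--         if maxd is not None and d < maxd:
--             cnt += 1
--         else:
--             maxd = d
--     return cnt
-- ===== Notes on version B (the rewrite author's own statement) =====
-- stated objective: alternative
-- what changed: Replaced A's all-pairs domination scan with a single sort by (attack descending, defense ascending) followed by one sweep counting elements whose defense is below the running maximum defense; worst-case O(n log n) instead of O(n^2), but A's early break makes it comparable on random inputs, so no speed is claimed.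
-- outside the precondition, e.g. on naive([[5]]): A returns 0, B raises IndexError
import Mathlib
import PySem

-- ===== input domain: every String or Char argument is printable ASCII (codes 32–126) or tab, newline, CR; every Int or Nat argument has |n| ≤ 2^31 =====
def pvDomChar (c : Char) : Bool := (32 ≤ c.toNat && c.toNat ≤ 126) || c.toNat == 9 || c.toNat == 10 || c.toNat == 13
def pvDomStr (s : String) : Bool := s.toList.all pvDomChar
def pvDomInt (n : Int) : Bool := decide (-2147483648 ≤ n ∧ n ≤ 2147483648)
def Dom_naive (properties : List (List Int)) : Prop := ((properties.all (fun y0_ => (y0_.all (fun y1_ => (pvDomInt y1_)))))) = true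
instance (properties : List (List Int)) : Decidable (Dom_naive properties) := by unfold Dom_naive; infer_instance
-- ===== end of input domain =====

-- B replaces A's all-pairs domination scan by a sort-then-sweep algorithm (alternative structure, O(n log n) worst case vs A's O(n^2) worst case; not measurably faster on random inputs, where A's early break helps it).


-- ===== PORT A =====
def naive (properties : List (List Int)) : Int :=
  let ln : Int := properties.length
  (PySem.List.pyRange 0 ln 1).foldl (fun cnt i =>
    let flag :=
      -- inner 'for j … if …: flag = True; break' = first-hit search over j
      (PySem.List.pyRange 0 ln 1).any (fun j =>
        let pi := PySem.List.pyGetD properties i []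
        let pj := PySem.List.pyGetD properties j []
        decide (PySem.List.pyGetD pi 0 0 < PySem.List.pyGetD pj 0 0) &&
        decide (PySem.List.pyGetD pi 1 0 < PySem.List.pyGetD pj 1 0))
    if flag then cnt + 1 else cnt) 0

-- ===== PORT B =====
-- Python tuple key (-q[0], q[1]) compares lexicographically: ported as a Lex pair.
def keyB (q : List Int) : Int ×ₗ Int :=
  toLex (-(PySem.List.pyGetD q 0 0), PySem.List.pyGetD q 1 0)

def sweepStep (st : Int × Option Int) (p : List Int) : Int × Option Int :=
  let d := PySem.List.pyGetD p 1 0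
  match st.2 with
  | some m => if d < m then (st.1 + 1, some m) else (st.1, some d)
  | none => (st.1, some d)

def naive_alt (properties : List (List Int)) : Int :=
  ((PySem.List.sorted properties keyB false).foldl sweepStep ((0 : Int), (none : Option Int))).1

-- ===== PRECONDITION & SPEC =====
-- Pre_ excludes inputs with an inner list of fewer than 2 stats: on those A raises
-- IndexError except when every two-stat comparison short-circuits (then A returns only
-- by accident of short-circuiting), while B's sort key always reads both stats and raises.
def Pre_naive (properties : List (List Int)) : Prop := ∀ p ∈ properties, 2 ≤ p.length
instance (properties : List (List Int)) : Decidable (Pre_naive properties) := by unfold Pre_naive; infer_instance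
def pvWitness_naive : List (List Int) := [[1, 2], [2, 3]]

def Spec_naive (properties : List (List Int)) (out : Int) : Prop := out = naive_alt properties
instance (properties : List (List Int)) (out : Int) : Decidable (Spec_naive properties out) := by unfold Spec_naive; infer_instance

-- ===== CLAIM (what is proved, stated in full; the proofs are below) =====
def Claim_equal_naive : Prop := ∀ (properties : List (List Int)), Dom_naive properties → Pre_naive properties → Spec_naive properties (naive properties)

-- ===== LEMMAS AND PROOFS =====

-- attack / defense of a character
def aOf (p : List Int) : Int := PySem.List.pyGetD p 0 0
def dOf (p : List Int) : Int := PySem.List.pyGetD p 1 0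

-- 'p is dominated by some element of L'
def domP (L : List (List Int)) (p : List Int) : Bool :=
  L.any (fun q => decide (aOf p < aOf q) && decide (dOf p < dOf q))

-- running maximum of defenses (none on the empty prefix), as the sweep maintains it
def dmax (pre : List (List Int)) : Option Int :=
  pre.foldl (fun m p => some (match m with | none => dOf p | some v => max v (dOf p))) none

lemma lt_foldl_max (l : List (List Int)) (x : Int) : ∀ c : Int,
    (x < l.foldl (fun v q => max v (dOf q)) c ↔ x < c ∨ ∃ q ∈ l, x < dOf q) := by
  induction l with
  | nil => intro c; simp
  | cons p t ih =>
    intro c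
    simp only [List.foldl_cons, ih (max c (dOf p)), lt_max_iff, List.mem_cons]
    constructor
    · rintro ((h | h) | ⟨q, hq, h⟩)
      · exact Or.inl h
      · exact Or.inr ⟨p, Or.inl rfl, h⟩
      · exact Or.inr ⟨q, Or.inr hq, h⟩
    · rintro (h | ⟨q, (rfl | hq), h⟩)
      · exact Or.inl (Or.inl h)
      · exact Or.inl (Or.inr h)
      · exact Or.inr ⟨q, hq, h⟩

lemma dmax_go (t : List (List Int)) : ∀ c : Int,
    t.foldl (fun m p => some (match m with | none => dOf p | some v => max v (dOf p))) (some c)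
      = some (t.foldl (fun v q => max v (dOf q)) c) := by
  induction t with
  | nil => intro c; rfl
  | cons q t ih => intro c; simp only [List.foldl_cons, ih]

lemma dmax_cons (p : List Int) (t : List (List Int)) :
    dmax (p :: t) = some (t.foldl (fun v q => max v (dOf q)) (dOf p)) := by
  simp only [dmax, List.foldl_cons]
  exact dmax_go t (dOf p)

lemma lt_dmax_iff (pre : List (List Int)) (x : Int) :
    (∃ v, dmax pre = some v ∧ x < v) ↔ ∃ q ∈ pre, x < dOf q := by
  cases pre with
  | nil => simp [dmax]
  | cons p t =>
    rw [dmax_cons]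
    constructor
    · rintro ⟨v, hv, hx⟩
      obtain rfl : (t.foldl (fun v q => max v (dOf q)) (dOf p)) = v := by
        injection hv
      rcases (lt_foldl_max t x (dOf p)).1 hx with h | ⟨q, hq, h⟩
      · exact ⟨p, List.mem_cons_self .., h⟩
      · exact ⟨q, List.mem_cons_of_mem _ hq, h⟩
    · rintro ⟨q, hq, h⟩
      refine ⟨_, rfl, ?_⟩
      rcases List.mem_cons.1 hq with rfl | hq
      · exact (lt_foldl_max t x (dOf q)).2 (Or.inl h)
      · exact (lt_foldl_max t x (dOf p)).2 (Or.inr ⟨q, hq, h⟩)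

lemma dmax_append_singleton (pre : List (List Int)) (p : List Int) :
    dmax (pre ++ [p]) =
      some (match dmax pre with | none => dOf p | some v => max v (dOf p)) := by
  simp [dmax, List.foldl_append]

-- key order facts: a later element (key ≥) never dominates, an earlier one with a larger
-- defense has a strictly larger attack
lemma not_dom_of_key_le {p q : List Int} (h : keyB p ≤ keyB q) :
    ¬ (aOf p < aOf q ∧ dOf p < dOf q) := by
  rintro ⟨h1, h2⟩
  rcases Prod.Lex.le_iff.1 h with hk | ⟨hk, hk2⟩ <;>
    [skip; skip] <;>
    simp only [keyB, ofLex_toLex] at hk <;>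
    simp only [aOf, dOf] at h1 h2 <;> omega

lemma attack_gt_of_key_le {q p : List Int} (h : keyB q ≤ keyB p) (hd : dOf p < dOf q) :
    aOf p < aOf q := by
  simp only [dOf] at hd
  rcases Prod.Lex.le_iff.1 h with hk | ⟨hk, hk2⟩
  · simp only [keyB, ofLex_toLex] at hk
    simp only [aOf]; omega
  · simp only [keyB, ofLex_toLex] at hk hk2
    simp only [aOf]; omega

-- head of a sorted suffix is never dominated inside its own suffix
lemma domP_eq_domP_pre (T pre S' : List (List Int)) (p : List Int)
    (hT : T = pre ++ p :: S')
    (hpair : T.Pairwise (fun a b => keyB a ≤ keyB b)) :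
    (domP T p = true) ↔ ∃ q ∈ pre, dOf p < dOf q := by
  subst hT
  rw [List.pairwise_append] at hpair
  obtain ⟨hpre, hsuf, hcross⟩ := hpair
  rw [List.pairwise_cons] at hsuf
  constructor
  · intro h
    rcases List.any_eq_true.1 h with ⟨q, hq, hcond⟩
    rw [Bool.and_eq_true, decide_eq_true_iff, decide_eq_true_iff] at hcond
    rcases List.mem_append.1 hq with hq | hq
    · exact ⟨q, hq, hcond.2⟩
    · rcases List.mem_cons.1 hq with rfl | hq
      · exact absurd hcond (by simp)
      · exact absurd hcond (not_dom_of_key_le (hsuf.1 q hq))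
  · rintro ⟨q, hq, h⟩
    refine List.any_eq_true.2 ⟨q, List.mem_append.2 (Or.inl hq), ?_⟩
    have hk := hcross q hq p (List.mem_cons_self ..)
    rw [Bool.and_eq_true, decide_eq_true_iff, decide_eq_true_iff]
    exact ⟨attack_gt_of_key_le hk h, h⟩

-- the sweep counts, along a key-sorted list, exactly the dominated elements
lemma sweep_go (T : List (List Int)) (hpair : T.Pairwise (fun a b => keyB a ≤ keyB b)) :
    ∀ (S pre : List (List Int)) (cnt : Int), T = pre ++ S →
      (S.foldl sweepStep (cnt, dmax pre)).1 = cnt + (S.countP (domP T) : Int) := by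
  intro S
  induction S with
  | nil => intro pre cnt _; simp
  | cons p S' ih =>
    intro pre cnt hT
    have hdom := domP_eq_domP_pre T pre S' p hT hpair
    have hstep : sweepStep (cnt, dmax pre) p =
        (if domP T p then cnt + 1 else cnt, dmax (pre ++ [p])) := by
      rw [dmax_append_singleton]
      simp only [sweepStep]
      cases hm : dmax pre with
      | none =>
        have : domP T p = false := by
          rw [← Bool.not_eq_true, hdom]
          rintro ⟨q, hq, h⟩
          have := (lt_dmax_iff pre (dOf p)).2 ⟨q, hq, h⟩
          rw [hm] at this
          exact absurd this (by simp)
        simp [this, dOf]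
      | some v =>
        by_cases hlt : PySem.List.pyGetD p 1 0 < v
        · have : domP T p = true := by
            rw [hdom, ← lt_dmax_iff]
            exact ⟨v, hm, hlt⟩
          simp only [this, if_pos hlt]
          simp [max_eq_left (le_of_lt hlt), dOf]
        · have : domP T p = false := by
            rw [← Bool.not_eq_true, hdom, ← lt_dmax_iff]
            rintro ⟨v', hv', h⟩
            rw [hm] at hv'
            injection hv' with hv'
            exact hlt (hv' ▸ h)
          have hmax : max v (dOf p) = dOf p := max_eq_right (by simp only [dOf]; omega)
          simp only [this, if_neg hlt, hmax]
          simp [dOf]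
    rw [List.foldl_cons, hstep, ih (pre ++ [p]) _ (by simpa using hT),
      List.countP_cons]
    by_cases h : domP T p = true
    · simp [h]; ring
    · simp [h]

lemma naive_eq_countP (properties : List (List Int)) :
    naive properties = (properties.countP (domP properties) : Int) := by
  unfold naive
  have hany : ∀ i : Int,
      ((PySem.List.pyRange 0 (properties.length : Int) 1).any (fun j =>
        decide (PySem.List.pyGetD (PySem.List.pyGetD properties i []) 0 0 <
                PySem.List.pyGetD (PySem.List.pyGetD properties j []) 0 0) &&
        decide (PySem.List.pyGetD (PySem.List.pyGetD properties i []) 1 0 <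
                PySem.List.pyGetD (PySem.List.pyGetD properties j []) 1 0)))
      = domP properties (PySem.List.pyGetD properties i []) := by
    intro i
    generalize PySem.List.pyGetD properties i [] = x
    conv_rhs => rw [← PySem.List.map_pyGetD_pyRange_zero' properties ([] : List Int)]
    simp only [domP, List.any_map]
    simp only [Function.comp_def, aOf, dOf]
    rfl
  simp only [hany]
  rw [PySem.List.foldl_pyRange_zero_pyGetD' properties []
    (fun cnt p => if domP properties p then cnt + 1 else cnt) 0,
    PySem.List.foldl_count_if, zero_add]

lemma naive_alt_eq_countP (properties : List (List Int)) :
    naive_alt properties = (properties.countP (domP properties) : Int) := by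
  unfold naive_alt
  have hperm := PySem.List.sorted_perm properties keyB false
  have hpair := PySem.List.sorted_pairwise properties keyB
  have h0 : dmax ([] : List (List Int)) = none := rfl
  rw [show ((0 : Int), (none : Option Int)) = ((0 : Int), dmax []) from by rw [h0]]
  rw [sweep_go (PySem.List.sorted properties keyB false) hpair
    (PySem.List.sorted properties keyB false) [] 0 rfl, zero_add]
  have hdom : ∀ p, domP (PySem.List.sorted properties keyB false) p = domP properties p := by
    intro p
    rw [Bool.eq_iff_iff, domP, domP, List.any_eq_true, List.any_eq_true]
    constructor <;> rintro ⟨q, hq, h⟩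
    · exact ⟨q, (PySem.List.mem_sorted properties keyB false q).1 hq, h⟩
    · exact ⟨q, (PySem.List.mem_sorted properties keyB false q).2 hq, h⟩
  rw [funext hdom, List.Perm.countP_eq _ hperm]

-- ===== VERDICT (by name: the statement is the Claim_ definition above) =====
theorem naive_spec : Claim_equal_naive := by
  intro properties _ _
  unfold Spec_naive
  rw [naive_eq_countP, naive_alt_eq_countP]
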